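-- pv_equiv track=rewrite | github.com/xmjlmm/school_learning | 气温变化趋势.py | temperatureTrend
-- ===== SOURCE A (Python) =====
-- def temperatureTrend(temperatureA: list[int], temperatureB: list[int]) -> int:
--     trendA, trendB = temperatureA[:], temperatureB[:]
--     length = len(temperatureA)
--     for i in range(1,length, 1):
--         # 上升
--         if temperatureA[i] > temperatureA[i-1]:
--             trendA[i] = 1
--         # 平稳
--         if temperatureA[i] == temperatureA[i-1]:
--             trendA[i] = 0
--         # 下降
--         if temperatureA[i] < temperatureA[i-1]:
--             trendA[i] = -1
--
--         # 上升
--         if temperatureB[i] > temperatureB[i-1]: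
--             trendB[i] = 1
--         # 平稳
--         if temperatureB[i] == temperatureB[i-1]:
--             trendB[i] = 0
--         # 下降
--         if temperatureB[i] < temperatureB[i-1]:
--             trendB[i] = -1
--
--
--     ans = 0
--     equal_trend = []
--     for i in range(1, length, 1):
--         if trendA[i] == trendB[i]:
--             ans = ans + 1
--         else:
--             equal_trend.append(ans)
--             ans = 0
--     equal_trend.append(ans)
--     return max(equal_trend)
-- ===== SOURCE B (Python) =====
-- def temperatureTrend(temperatureA: list[int], temperatureB: list[int]) -> int:
--     best = 0
--     cur = 0
--     for i in range(1, len(temperatureA)):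
--         sa = (temperatureA[i] > temperatureA[i - 1]) - (temperatureA[i] < temperatureA[i - 1])
--         sb = (temperatureB[i] > temperatureB[i - 1]) - (temperatureB[i] < temperatureB[i - 1])
--         if sa == sb:
--             cur += 1
--             if cur > best:
--                 best = cur
--         else:
--             cur = 0
--     return best
-- ===== Notes on version B (the rewrite author's own statement) =====
-- stated objective: simpler
-- what changed: Drops the two materialized trend arrays and the run-length list (with a final max) in favour of a single fused pass that computes the comparison signs on the fly and tracks the current and maximum matching streak.
import Mathlib
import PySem

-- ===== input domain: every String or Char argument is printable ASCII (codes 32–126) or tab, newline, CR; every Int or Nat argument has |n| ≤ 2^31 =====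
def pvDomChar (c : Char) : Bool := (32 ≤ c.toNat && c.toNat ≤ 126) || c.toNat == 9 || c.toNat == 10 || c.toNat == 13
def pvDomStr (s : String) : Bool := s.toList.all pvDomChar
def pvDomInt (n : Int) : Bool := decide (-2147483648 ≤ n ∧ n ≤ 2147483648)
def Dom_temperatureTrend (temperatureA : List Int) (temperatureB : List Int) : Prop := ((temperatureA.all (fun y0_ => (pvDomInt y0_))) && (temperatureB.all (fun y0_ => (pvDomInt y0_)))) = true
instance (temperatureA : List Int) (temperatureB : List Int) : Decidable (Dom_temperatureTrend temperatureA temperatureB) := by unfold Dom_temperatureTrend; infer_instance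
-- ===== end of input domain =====

-- B fuses A's three passes (trend arrays + run-length list + final max) into one streak-tracking pass; objective: simpler.


-- ===== PORT A =====
-- loop body of A's first pass (the three if-reassignments per list); pyGetD/pySetD are
-- exact here because inside Pre_ every index 1 ≤ i < len(temperatureA) ≤ len(temperatureB) is valid
def stepTrend (a b : List Int) (st : List Int × List Int) (i : Int) : List Int × List Int :=
  let tA := if PySem.List.pyGetD a i 0 > PySem.List.pyGetD a (i-1) 0 then PySem.List.pySetD st.1 i 1 else st.1
  let tA := if PySem.List.pyGetD a i 0 = PySem.List.pyGetD a (i-1) 0 then PySem.List.pySetD tA i 0 else tA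
  let tA := if PySem.List.pyGetD a i 0 < PySem.List.pyGetD a (i-1) 0 then PySem.List.pySetD tA i (-1) else tA
  let tB := if PySem.List.pyGetD b i 0 > PySem.List.pyGetD b (i-1) 0 then PySem.List.pySetD st.2 i 1 else st.2
  let tB := if PySem.List.pyGetD b i 0 = PySem.List.pyGetD b (i-1) 0 then PySem.List.pySetD tB i 0 else tB
  let tB := if PySem.List.pyGetD b i 0 < PySem.List.pyGetD b (i-1) 0 then PySem.List.pySetD tB i (-1) else tB
  (tA, tB)

-- loop body of A's second pass (ans counter + the equal_trend list)
def stepCount (st : List Int × List Int) (s : Int × List Int) (i : Int) : Int × List Int :=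
  if PySem.List.pyGetD st.1 i 0 = PySem.List.pyGetD st.2 i 0 then (s.1 + 1, s.2) else (0, s.2 ++ [s.1])

def temperatureTrend (temperatureA : List Int) (temperatureB : List Int) : Int :=
  let length : Int := PySem.List.len temperatureA
  let st := (PySem.List.pyRange 1 length 1).foldl (stepTrend temperatureA temperatureB) (temperatureA, temperatureB)
  let r := (PySem.List.pyRange 1 length 1).foldl (stepCount st) (0, ([] : List Int))
  -- max(equal_trend): the list is nonempty (ans is always appended), so getD 0 is exact
  ((PySem.List.max? (r.2 ++ [r.1]) (fun x => x)).getD 0)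

-- ===== PORT B =====
-- loop body of B's single pass: step signs, current streak, best streak
def stepAlt (a b : List Int) (s : Int × Int) (i : Int) : Int × Int :=
  let sa := (if PySem.List.pyGetD a i 0 > PySem.List.pyGetD a (i-1) 0 then (1:Int) else 0)
          - (if PySem.List.pyGetD a i 0 < PySem.List.pyGetD a (i-1) 0 then (1:Int) else 0)
  let sb := (if PySem.List.pyGetD b i 0 > PySem.List.pyGetD b (i-1) 0 then (1:Int) else 0)
          - (if PySem.List.pyGetD b i 0 < PySem.List.pyGetD b (i-1) 0 then (1:Int) else 0)
  if sa = sb then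
    let cur := s.1 + 1
    (cur, if cur > s.2 then cur else s.2)
  else (0, s.2)

def temperatureTrend_alt (temperatureA : List Int) (temperatureB : List Int) : Int :=
  ((PySem.List.pyRange 1 (PySem.List.len temperatureA) 1).foldl
    (stepAlt temperatureA temperatureB) (0, 0)).2

-- ===== PRECONDITION & SPEC =====
-- Pre_ excludes exactly the inputs on which A raises IndexError: a strictly shorter temperatureB
-- together with len(temperatureA) ≥ 2 (the loop then accesses temperatureB[i] past its end).
def Pre_temperatureTrend (temperatureA : List Int) (temperatureB : List Int) : Prop :=
  temperatureA.length ≤ temperatureB.length ∨ temperatureA.length ≤ 1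
instance (temperatureA : List Int) (temperatureB : List Int) : Decidable (Pre_temperatureTrend temperatureA temperatureB) := by unfold Pre_temperatureTrend; infer_instance
def pvWitness_temperatureTrend : List Int × List Int := ([3, 1, 2, 2], [5, 5, 6, 1])
def Spec_temperatureTrend (temperatureA : List Int) (temperatureB : List Int) (out : Int) : Prop := out = temperatureTrend_alt temperatureA temperatureB
instance (temperatureA : List Int) (temperatureB : List Int) (out : Int) : Decidable (Spec_temperatureTrend temperatureA temperatureB out) := by unfold Spec_temperatureTrend; infer_instance

-- ===== CLAIM (what is proved, stated in full; the proofs are below) =====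
def Claim_equal_temperatureTrend : Prop := ∀ (temperatureA : List Int) (temperatureB : List Int), Dom_temperatureTrend temperatureA temperatureB → Pre_temperatureTrend temperatureA temperatureB → Spec_temperatureTrend temperatureA temperatureB (temperatureTrend temperatureA temperatureB)

-- ===== LEMMAS AND PROOFS =====

-- the trend value A stores at index i (sign of the step)
def sgn (x y : Int) : Int := if x > y then 1 else if x = y then 0 else -1

-- the per-index boolean both loops branch on: the two step signs agree at index i
def condAB (a b : List Int) (i : Int) : Bool :=
  decide (sgn (a.getD i.toNat 0) (a.getD (i.toNat - 1) 0) = sgn (b.getD i.toNat 0) (b.getD (i.toNat - 1) 0))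

lemma sgn_eq_sub (x y : Int) :
    sgn x y = (if x > y then (1:Int) else 0) - (if x < y then (1:Int) else 0) := by
  unfold sgn; split_ifs <;> omega

lemma stepTrend_eq (a b : List Int) (st : List Int × List Int) (i : Int) :
    stepTrend a b st i =
      (PySem.List.pySetD st.1 i (sgn (PySem.List.pyGetD a i 0) (PySem.List.pyGetD a (i-1) 0)),
       PySem.List.pySetD st.2 i (sgn (PySem.List.pyGetD b i 0) (PySem.List.pyGetD b (i-1) 0))) := by
  unfold stepTrend sgn
  split_ifs <;> first | rfl | omega

-- contents of A's two trend arrays after the first pass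
lemma trend_content (a b : List Int) :
    ∀ (n : Nat), n + 1 ≤ a.length → a.length ≤ b.length →
    (((PySem.List.pyRange 1 (1 + (n:Int)) 1).foldl (stepTrend a b) (a, b)).1.length = a.length ∧
     ((PySem.List.pyRange 1 (1 + (n:Int)) 1).foldl (stepTrend a b) (a, b)).2.length = b.length ∧
     ∀ j : Nat, 1 ≤ j → j ≤ n →
       ((PySem.List.pyRange 1 (1 + (n:Int)) 1).foldl (stepTrend a b) (a, b)).1[j]? =
         some (sgn (a.getD j 0) (a.getD (j-1) 0)) ∧
       ((PySem.List.pyRange 1 (1 + (n:Int)) 1).foldl (stepTrend a b) (a, b)).2[j]? =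
         some (sgn (b.getD j 0) (b.getD (j-1) 0))) := by
  intro n
  induction n with
  | zero =>
    intro _ _
    rw [show (1 + ((0:Nat):Int)) = 1 by norm_num, PySem.List.pyRange_one_eq_nil le_rfl]
    exact ⟨rfl, rfl, fun j h1 h2 => absurd h2 (by omega)⟩
  | succ n ih =>
    intro hn hb
    obtain ⟨ihl1, ihl2, ihv⟩ := ih (by omega) hb
    have hsplit : PySem.List.pyRange 1 (1 + ((n+1:Nat):Int)) 1 = PySem.List.pyRange 1 (1 + (n:Int)) 1 ++ [1 + (n:Int)] := by
      push_cast
      rw [show (1 + ((n:Int) + 1)) = (1 + (n:Int)) + 1 by ring]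
      exact PySem.List.pyRange_one_succ_right (by omega)
    rw [hsplit, List.foldl_append, List.foldl_cons, List.foldl_nil, stepTrend_eq]
    set st := (PySem.List.pyRange 1 (1 + (n:Int)) 1).foldl (stepTrend a b) (a, b) with hst
    have hcast : (1 + (n:Int)) = ((n+1 : Nat) : Int) := by push_cast; ring
    rw [hcast, PySem.List.pySetD_natCast, PySem.List.pySetD_natCast]
    refine ⟨by simp [ihl1], by simp [ihl2], ?_⟩
    intro j h1 h2
    have e2 : (((n+1:Nat):Int) - 1) = ((n:Nat):Int) := by push_cast; ring
    by_cases hj : j = n + 1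
    · subst hj
      constructor
      · rw [List.getElem?_set]
        simp only [ihl1]
        rw [if_pos trivial, if_pos (show n + 1 < a.length by omega), e2,
            PySem.List.pyGetD_natCast, PySem.List.pyGetD_natCast]
        simp
      · rw [List.getElem?_set]
        simp only [ihl2]
        rw [if_pos trivial, if_pos (show n + 1 < b.length by omega), e2,
            PySem.List.pyGetD_natCast, PySem.List.pyGetD_natCast]
        simp
    · have := ihv j h1 (by omega)
      constructor
      · rw [List.getElem?_set, if_neg (by omega)]; exact this.1
      · rw [List.getElem?_set, if_neg (by omega)]; exact this.2

-- A's second pass and B's pass over the same index list, branching on the same boolean: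
-- invariant linking (ans, equal_trend) to (cur, best)
lemma count_core (c : Int → Bool) :
    ∀ (l : List Int) (ans : Int) (acc : List Int) (best : Int),
      0 ≤ ans → (∀ x ∈ acc, 0 ≤ x) → best = max (acc.foldl max 0) ans →
      (let ra := l.foldl (fun (s : Int × List Int) i => if c i then (s.1 + 1, s.2) else (0, s.2 ++ [s.1])) (ans, acc)
       let rb := l.foldl (fun (s : Int × Int) i => if c i then (s.1 + 1, if s.1 + 1 > s.2 then s.1 + 1 else s.2) else (0, s.2)) (ans, best)
       0 ≤ ra.1 ∧ (∀ x ∈ ra.2, 0 ≤ x) ∧ rb.2 = max (ra.2.foldl max 0) ra.1) := by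
  intro l
  induction l with
  | nil => intro ans acc best h0 hacc hbest; exact ⟨h0, hacc, by simpa using hbest⟩
  | cons hd tl ih =>
    intro ans acc best h0 hacc hbest
    simp only [List.foldl_cons]
    cases hc : c hd
    · simp only [Bool.false_eq_true, if_false]
      apply ih 0 (acc ++ [ans]) best le_rfl
      · intro x hx
        rcases List.mem_append.mp hx with h | h
        · exact hacc x h
        · simp at h; omega
      · have hM : 0 ≤ acc.foldl max 0 := (PySem.List.le_foldl_max acc 0).1
        simp [List.foldl_append]
        omega
    · simp only [if_true]
      apply ih (ans + 1) acc (if ans + 1 > best then ans + 1 else best) (by omega) hacc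
      split_ifs <;> omega

-- max(t ++ [v]) as the running max, for nonnegative entries
lemma max_append_singleton (t : List Int) (v : Int) (ht : ∀ x ∈ t, 0 ≤ x) (hv : 0 ≤ v) :
    ((PySem.List.max? (t ++ [v]) (fun x => x)).getD 0) = max (t.foldl max 0) v := by
  cases t with
  | nil => simp [PySem.List.max?_id_cons]; omega
  | cons x ts =>
    have hx : 0 ≤ x := ht x (by simp)
    rw [List.cons_append, PySem.List.max?_id_cons]
    simp [List.foldl_append]
    rw [show max 0 x = x by omega]

-- ===== VERDICT (by name: the statement is the Claim_ definition above) =====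
theorem temperatureTrend_spec : Claim_equal_temperatureTrend := by
  intro a b _ hpre
  unfold Spec_temperatureTrend
  simp only [temperatureTrend, temperatureTrend_alt]
  by_cases hlen : a.length ≤ 1
  · have hnil : PySem.List.pyRange 1 ((a.length : Int)) 1 = [] :=
      PySem.List.pyRange_one_eq_nil (by omega)
    simp [PySem.List.len_eq, hnil, PySem.List.max?_id_cons]
  · have hb : a.length ≤ b.length := by
      rcases hpre with h | h
      · exact h
      · omega
    have hN : (PySem.List.len a) = 1 + ((a.length - 1 : Nat) : Int) := by
      simp [PySem.List.len_eq]; omega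
    obtain ⟨hl1, hl2, hv⟩ := trend_content a b (a.length - 1) (by omega) hb
    rw [hN]
    set R := PySem.List.pyRange 1 (1 + ((a.length - 1 : Nat) : Int)) 1 with hR
    set st := R.foldl (stepTrend a b) (a, b) with hst
    have hA : ∀ (s : Int × List Int) (i : Int), i ∈ R →
        stepCount st s i = (if condAB a b i then (s.1 + 1, s.2) else (0, s.2 ++ [s.1])) := by
      intro s i hi
      rw [hR, PySem.List.mem_pyRange_one] at hi
      have h0 : i = ((i.toNat : Nat) : Int) := (Int.toNat_of_nonneg (by omega)).symm
      obtain ⟨hv1, hv2⟩ := hv i.toNat (by omega) (by omega)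
      unfold stepCount
      rw [h0, PySem.List.pyGetD_natCast, PySem.List.pyGetD_natCast,
          List.getD_eq_getElem?_getD, List.getD_eq_getElem?_getD, hv1, hv2]
      simp only [Option.getD_some, condAB, Int.toNat_natCast]
      simp only [decide_eq_true_eq]
      rfl
    have hB : ∀ (s : Int × Int) (i : Int), i ∈ R →
        stepAlt a b s i = (if condAB a b i then (s.1 + 1, if s.1 + 1 > s.2 then s.1 + 1 else s.2) else (0, s.2)) := by
      intro s i hi
      rw [hR, PySem.List.mem_pyRange_one] at hi
      have h0 : i = ((i.toNat : Nat) : Int) := (Int.toNat_of_nonneg (by omega)).symm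
      have e1 : ((i.toNat : Nat) : Int) - 1 = ((i.toNat - 1 : Nat) : Int) := by omega
      unfold stepAlt
      rw [h0, e1, PySem.List.pyGetD_natCast, PySem.List.pyGetD_natCast,
          PySem.List.pyGetD_natCast, PySem.List.pyGetD_natCast,
          ← sgn_eq_sub, ← sgn_eq_sub]
      simp only [condAB, Int.toNat_natCast]
      simp only [decide_eq_true_eq]
    rw [PySem.List.foldl_congr_mem R (stepCount st) _ (0, ([] : List Int)) hA,
        PySem.List.foldl_congr_mem R (stepAlt a b) _ ((0 : Int), (0 : Int)) hB]
    have := count_core (condAB a b) R 0 [] 0 le_rfl (by simp) (by simp)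
    simp only at this
    obtain ⟨h1, h2, h3⟩ := this
    rw [max_append_singleton _ _ h2 h1, h3]
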